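-- pv_equiv track=rewrite | github.com/adwibha/ML-SMS-Filter-Project-PY | smsfiltering.py | df_term_freq
-- ===== SOURCE A (Python) =====
-- def df_term_freq(text):
--     words = text.lower().split(' ')
--     freq = {}
--
--     # Count the frequency of each word
--     for word in words:
--         if word in freq:
--             freq[word] += 1
--         else:
--             freq[word] = 1
--
--     # Find the most popular term/word
--     max_frequency = 0
--     for word in freq:
--         if freq[word] > max_frequency:
--             max_frequency = freq[word]
--
--     return max_frequency
-- ===== SOURCE B (Python) =====
-- def df_term_freq(text):
--     words = sorted(text.lower().split(' '))
--     best = 0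
--     run = 0
--     prev = None
--     for w in words:
--         if w == prev:
--             run += 1
--         else:
--             run = 1
--             prev = w
--         if run > best:
--             best = run
--     return best
-- ===== Notes on version B (the rewrite author's own statement) =====
-- stated objective: alternative
-- what changed: Replaces A's frequency dictionary (count loop plus max-scan over keys) with sort-then-scan: sort the word list once and compute the longest run of equal consecutive words in a single pass with run/prev/best accumulators, no dictionary at all.
import Mathlib
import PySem

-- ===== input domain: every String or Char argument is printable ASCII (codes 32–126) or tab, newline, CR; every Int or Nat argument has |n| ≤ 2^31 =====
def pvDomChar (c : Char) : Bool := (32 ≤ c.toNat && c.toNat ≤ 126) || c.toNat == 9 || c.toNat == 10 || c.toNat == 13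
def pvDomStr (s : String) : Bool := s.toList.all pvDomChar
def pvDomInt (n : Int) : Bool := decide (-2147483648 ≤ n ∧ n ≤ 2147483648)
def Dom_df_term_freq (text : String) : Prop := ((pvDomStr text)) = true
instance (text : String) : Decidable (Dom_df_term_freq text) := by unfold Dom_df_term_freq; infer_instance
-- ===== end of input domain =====

-- B replaces A's frequency dictionary and key-scan by sort-then-scan: sort the words and
-- take the longest run of equal consecutive words in one pass (alternative decomposition).

-- ===== PORT A =====
def df_term_freq (text : String) : Int :=
  let words := (PySem.Str.split? (PySem.Str.lower text) " ").getD []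
  let freq := words.foldl
    (fun d w => if d.contains w then d.modify w 0 (· + 1) else d.insert w 1)
    (PySem.Dict.empty : PySem.Dict String Int)
  freq.keys.foldl (fun m w => if freq.getD w 0 > m then freq.getD w 0 else m) 0

-- ===== PORT B =====
def df_term_freq_alt (text : String) : Int :=
  let words := PySem.List.sorted ((PySem.Str.split? (PySem.Str.lower text) " ").getD []) (fun w => w) false
  (words.foldl
    (fun (s : Int × Int × Option String) w =>
      let run' := if some w == s.2.2 then s.2.1 + 1 else 1
      let prev' := if some w == s.2.2 then s.2.2 else some w
      (if run' > s.1 then run' else s.1, run', prev'))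
    ((0 : Int), (0 : Int), (none : Option String))).1

-- ===== PRECONDITION & SPEC =====
def Spec_df_term_freq (text : String) (out : Int) : Prop := out = df_term_freq_alt text
instance (text : String) (out : Int) : Decidable (Spec_df_term_freq text out) := by unfold Spec_df_term_freq; infer_instance

-- ===== CLAIM (what is proved, stated in full; the proofs are below) =====
def Claim_equal_df_term_freq : Prop := ∀ (text : String), Dom_df_term_freq text → Spec_df_term_freq text (df_term_freq text)

-- ===== LEMMAS AND PROOFS =====

-- A's counting-loop body, named for the lemmas below
def pvStep (d : PySem.Dict String Int) (w : String) : PySem.Dict String Int :=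
  if d.contains w then d.modify w 0 (· + 1) else d.insert w 1

lemma pv_mem_keys_foldl (l : List String) (d : PySem.Dict String Int) (k : String) :
    k ∈ (l.foldl pvStep d).keys ↔ k ∈ d.keys ∨ k ∈ l := by
  induction l generalizing d with
  | nil => simp
  | cons w t ih =>
    simp only [List.foldl_cons, ih, List.mem_cons]
    have : k ∈ (pvStep d w).keys ↔ k ∈ d.keys ∨ k = w := by
      unfold pvStep
      split
      · rw [PySem.Dict.keys_modify, PySem.Dict.mem_keys_insert]; tauto
      · rw [PySem.Dict.mem_keys_insert]; tauto
    rw [this]; tauto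

lemma pv_getD_foldl (l : List String) (d : PySem.Dict String Int) (v : String) :
    (l.foldl pvStep d).getD v 0 = d.getD v 0 + (l.count v : Int) := by
  induction l generalizing d with
  | nil => simp
  | cons w t ih =>
    rw [List.foldl_cons, ih]
    have hstep : (pvStep d w).getD v 0 = d.getD v 0 + (if v = w then 1 else 0) := by
      unfold pvStep
      split
      next h =>
        rw [PySem.Dict.getD_modify]
        split_ifs with hv <;> simp [hv]
      next h =>
        rw [PySem.Dict.getD_insert]
        have h0 : d.getD w 0 = 0 :=
          PySem.Dict.getD_of_not_contains d 0 (by simpa using h)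
        split_ifs with hv <;> simp [hv, h0]
    rw [hstep, List.count_cons]
    by_cases hv : v = w
    · simp only [hv, beq_self_eq_true, if_true]
      push_cast; ring
    · simp [hv]
      exact fun h => hv h.symm

lemma pv_foldl_max_le (l : List Int) (i m : Int) (hi : i ≤ m) (hl : ∀ x ∈ l, x ≤ m) :
    l.foldl max i ≤ m := by
  induction l generalizing i with
  | nil => simpa using hi
  | cons x t ih =>
    exact ih (max i x) (max_le hi (hl x (by simp))) (fun y hy => hl y (by simp [hy]))

-- max frequency of a list, by the run/filter recursion that B's sorted scan realises
def pvN : List String → Int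
  | [] => 0
  | w :: t => max (((w :: t).count w : Nat) : Int) (pvN (t.filter (fun x => !(x == w))))
termination_by l => l.length
decreasing_by
  simp only [List.length_cons, Nat.lt_succ_iff, List.length_unattach]
  exact le_trans (List.length_filter_le _ _) (le_of_eq (List.length_attach))

lemma pvN_nonneg_aux : ∀ (n : Nat) (m : List String), m.length ≤ n → 0 ≤ pvN m := by
  intro n
  induction n with
  | zero => intro m hm; rw [List.length_eq_zero_iff.mp (Nat.le_zero.mp hm)]; simp [pvN]
  | succ n ih =>
    intro m hm
    cases m with
    | nil => simp [pvN]
    | cons w t =>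
      rw [pvN]
      refine le_trans (ih _ ?_) (le_max_right _ _)
      simp only [List.length_cons, Nat.succ_le_succ_iff] at hm
      exact le_trans (List.length_filter_le _ _) hm

lemma pvN_nonneg (m : List String) : 0 ≤ pvN m := pvN_nonneg_aux m.length m le_rfl

lemma pv_count_filter_ne (t : List String) (x w : String) (hxw : x ≠ w) :
    (t.filter (fun y => !(y == w))).count x = t.count x := by
  rw [List.count_filter]
  simp [hxw]

lemma pvN_ge_count_aux : ∀ (n : Nat) (m : List String), m.length ≤ n →
    ∀ x ∈ m, ((m.count x : Nat) : Int) ≤ pvN m := by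
  intro n
  induction n with
  | zero =>
    intro m hm x hx
    rw [List.length_eq_zero_iff.mp (Nat.le_zero.mp hm)] at hx
    simp at hx
  | succ n ih =>
    intro m hm x hx
    cases m with
    | nil => simp at hx
    | cons w t =>
      rw [pvN]
      by_cases hxw : x = w
      · subst hxw; exact le_max_left _ _
      · have hxt : x ∈ t := by
          rcases List.mem_cons.mp hx with h | h
          · exact absurd h hxw
          · exact h
        have hxf : x ∈ t.filter (fun y => !(y == w)) :=
          List.mem_filter.mpr ⟨hxt, by simp [hxw]⟩
        have hlen : (t.filter (fun y => !(y == w))).length ≤ n := by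
          simp only [List.length_cons, Nat.succ_le_succ_iff] at hm
          exact le_trans (List.length_filter_le _ _) hm
        have hcnt : ((w :: t).count x : Int) = ((t.filter (fun y => !(y == w))).count x : Int) := by
          rw [pv_count_filter_ne t x w hxw, List.count_cons]
          simp only [Nat.cast_inj]
          simp
          exact fun h => hxw h.symm
        rw [hcnt]
        exact le_trans (ih _ hlen x hxf) (le_max_right _ _)

lemma pvN_attained_aux : ∀ (n : Nat) (m : List String), m.length ≤ n →
    pvN m = 0 ∨ ∃ x ∈ m, pvN m = ((m.count x : Nat) : Int) := by
  intro n
  induction n with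
  | zero =>
    intro m hm
    rw [List.length_eq_zero_iff.mp (Nat.le_zero.mp hm)]
    left; simp [pvN]
  | succ n ih =>
    intro m hm
    cases m with
    | nil => left; simp [pvN]
    | cons w t =>
      rw [pvN]
      by_cases hle : pvN (t.filter (fun x => !(x == w))) ≤ (((w :: t).count w : Nat) : Int)
      · right
        exact ⟨w, by simp, (max_eq_left hle)⟩
      · rw [not_le] at hle
        rw [max_eq_right hle.le]
        have hlen : (t.filter (fun x => !(x == w))).length ≤ n := by
          simp only [List.length_cons, Nat.succ_le_succ_iff] at hm
          exact le_trans (List.length_filter_le _ _) hm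
        rcases ih _ hlen with h0 | ⟨x, hx, hval⟩
        · exfalso
          have : (0:Int) ≤ (((w :: t).count w : Nat) : Int) := by positivity
          omega
        · right
          have hxmem : x ∈ t := (List.mem_filter.mp hx).1
          have hxw : ¬ (x = w) := by
            have := (List.mem_filter.mp hx).2
            simpa using this
          refine ⟨x, List.mem_cons_of_mem _ hxmem, ?_⟩
          rw [hval]
          rw [pv_count_filter_ne t x w hxw, List.count_cons]
          simp only [Nat.cast_inj]
          simp
          exact fun h => hxw h.symm

lemma pvN_ge_count (m : List String) (x : String) (hx : x ∈ m) :
    ((m.count x : Nat) : Int) ≤ pvN m := pvN_ge_count_aux m.length m le_rfl x hx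

lemma pvN_attained (m : List String) :
    pvN m = 0 ∨ ∃ x ∈ m, pvN m = ((m.count x : Nat) : Int) :=
  pvN_attained_aux m.length m le_rfl

-- B's loop, as a recursion on the word list (state best/run/prev)
def pvScan : List String → Option String → Int → Int → Int
  | [], _, _, best => best
  | w :: t, prev, run, best =>
      let run' := if some w == prev then run + 1 else 1
      let prev' := if some w == prev then prev else some w
      pvScan t prev' run' (if run' > best then run' else best)

lemma pv_fold_eq_scan (l : List String) (best run : Int) (prev : Option String) :
    (l.foldl
      (fun (s : Int × Int × Option String) w =>
        let run' := if some w == s.2.2 then s.2.1 + 1 else 1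
        let prev' := if some w == s.2.2 then s.2.2 else some w
        (if run' > s.1 then run' else s.1, run', prev'))
      (best, run, prev)).1 = pvScan l prev run best := by
  induction l generalizing best run prev with
  | nil => rfl
  | cons w t ih => simp only [List.foldl_cons, pvScan, ih]

-- count of the pending previous word (None counts as nothing)
def pvCnt : Option String → List String → Int
  | some p, l => ((l.count p : Nat) : Int)
  | none, _ => 0

lemma pv_scan_none_step (w : String) (t : List String) (run best : Int) :
    pvScan (w :: t) none run best = pvScan t (some w) 1 (if 1 > best then 1 else best) := by
  rw [pvScan]; simp

lemma pv_scan_eq_step (w : String) (t : List String) (run best : Int) :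
    pvScan (w :: t) (some w) run best =
      pvScan t (some w) (run + 1) (if run + 1 > best then run + 1 else best) := by
  rw [pvScan]; simp

lemma pv_scan_ne_step (w p : String) (t : List String) (run best : Int) (h : w ≠ p) :
    pvScan (w :: t) (some p) run best = pvScan t (some w) 1 (if 1 > best then 1 else best) := by
  rw [pvScan]; simp [h]

-- the scan over a sorted suffix: best ⊔ (run extended by prev's remaining count) ⊔ pvN of the rest
lemma pv_scan_eq (l : List String) (prev : Option String) (run best : Int)
    (hs : l.Pairwise (· ≤ ·))
    (hge : ∀ x ∈ l, ∀ q, prev = some q → q ≤ x)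
    (h0 : 0 ≤ run) (hrb : run ≤ best) :
    pvScan l prev run best =
      max best (max (run + pvCnt prev l)
        (pvN (l.filter (fun x => !(some x == prev))))) := by
  induction l generalizing prev run best with
  | nil =>
    have hN : pvN ([] : List String) = 0 := by simp [pvN]
    cases prev <;> simp [pvScan, pvCnt, hN] <;> omega
  | cons w t ih =>
    have hpair := (List.pairwise_cons.mp hs).1
    have hst := (List.pairwise_cons.mp hs).2
    have hfilt2 : t.filter (fun x => !(some x == some w)) = t.filter (fun x => !(x == w)) := by
      apply List.filter_congr; intro a _; simp
    have hN : pvN (w :: t) = max (((w :: t).count w : Nat) : Int) (pvN (t.filter (fun x => !(x == w)))) := by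
      rw [pvN]
    have hc : (((w :: t).count w : Nat) : Int) = 1 + (t.count w : Int) := by
      rw [List.count_cons_self]; push_cast; ring
    have hcnt2 : (0:Int) ≤ ((t.count w : Nat) : Int) := by positivity
    cases prev with
    | none =>
      rw [pv_scan_none_step w t run best,
          ih (some w) 1 (if 1 > best then 1 else best) hst
            (fun x hx q hq => by cases hq; exact hpair x hx)
            (by omega) (by split <;> omega)]
      have hfilt : (w :: t).filter (fun x => !(some x == (none : Option String))) = w :: t := by
        apply List.filter_eq_self.mpr; intro a _; rfl
      rw [hfilt, hfilt2]
      simp only [pvCnt]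
      omega
    | some p =>
      by_cases hwp : w = p
      · -- same word: extend the run
        subst hwp
        rw [pv_scan_eq_step w t run best,
            ih (some w) (run + 1) (if run + 1 > best then run + 1 else best) hst
              (fun x hx q hq => by cases hq; exact hpair x hx)
              (by omega) (by split <;> omega)]
        have hfilt : (w :: t).filter (fun x => !(some x == some w)) =
            t.filter (fun x => !(some x == some w)) := by
          rw [List.filter_cons]; simp
        rw [hfilt, hfilt2]
        have hNf := pvN_nonneg (t.filter (fun x => !(x == w)))
        simp only [pvCnt, List.count_cons_self]
        push_cast
        omega
      · -- new word: p < w, p occurs no more in w :: t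
        have hpw : p ≤ w := hge w (by simp) p rfl
        have hplt : p < w := lt_of_le_of_ne hpw (fun h => hwp h.symm)
        rw [pv_scan_ne_step w p t run best hwp,
            ih (some w) 1 (if 1 > best then 1 else best) hst
              (fun x hx q hq => by cases hq; exact hpair x hx)
              (by omega) (by split <;> omega)]
        have hnotp : ∀ x ∈ w :: t, ¬ (x = p) := by
          intro x hx hxp
          rcases List.mem_cons.mp hx with h | h
          · exact hwp (h ▸ hxp ▸ rfl)
          · have hwx : w ≤ x := hpair x h
            subst hxp
            exact absurd hwx (not_le.mpr hplt)
        have hcount0 : (w :: t).count p = 0 := by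
          rw [List.count_eq_zero]
          intro hmem
          exact hnotp p hmem rfl
        have hfilt : (w :: t).filter (fun x => !(some x == some p)) = w :: t := by
          apply List.filter_eq_self.mpr
          intro a ha
          simp only [Bool.not_eq_eq_eq_not, Bool.not_true, beq_eq_false_iff_ne, ne_eq,
            Option.some.injEq]
          exact hnotp a ha
        rw [hfilt, hfilt2]
        simp only [pvCnt, hcount0]
        have hNf := pvN_nonneg (t.filter (fun x => !(x == w)))
        push_cast
        omega

-- main bridge: A's dict-and-scan value equals pvN of the sorted word list
lemma pv_main (ws : List String) :
    (ws.foldl pvStep (PySem.Dict.empty : PySem.Dict String Int)).keys.foldl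
      (fun m w => if (ws.foldl pvStep (PySem.Dict.empty : PySem.Dict String Int)).getD w 0 > m
                  then (ws.foldl pvStep (PySem.Dict.empty : PySem.Dict String Int)).getD w 0 else m) 0
    = pvN (PySem.List.sorted ws (fun w => w) false) := by
  set sws := PySem.List.sorted ws (fun w => w) false with hsws
  have hperm : sws.Perm ws := PySem.List.sorted_perm ws (fun w => w) false
  set c : String → Int := fun w => (ws.count w : Int) with hc
  set F := ws.foldl pvStep (PySem.Dict.empty : PySem.Dict String Int) with hF
  have hgetD : ∀ v, F.getD v 0 = c v := by
    intro v
    rw [hF, pv_getD_foldl ws PySem.Dict.empty v, hc]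
    simp
  have hkeys : ∀ k, k ∈ F.keys ↔ k ∈ ws := by
    intro k
    have := pv_mem_keys_foldl ws PySem.Dict.empty k
    simpa using this
  have hA : F.keys.foldl (fun m w => if F.getD w 0 > m then F.getD w 0 else m) 0
      = (F.keys.map c).foldl max 0 := by
    rw [List.foldl_map]
    congr 1
    funext m w
    rw [hgetD]
    by_cases h : c w ≤ m
    · simp [max_eq_left h, not_lt.mpr h]
    · rw [not_le] at h
      simp [max_eq_right h.le, h]
  rw [hA]
  apply le_antisymm
  · apply pv_foldl_max_le
    · exact pvN_nonneg sws
    · intro x hx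
      rcases List.mem_map.mp hx with ⟨k, hk, rfl⟩
      have hkws : k ∈ ws := (hkeys k).mp hk
      have hceq : c k = ((sws.count k : Nat) : Int) := by
        rw [hc]; simp [hperm.count_eq]
      rw [hceq]
      exact pvN_ge_count sws k (hperm.mem_iff.mpr hkws)
  · rcases pvN_attained sws with h0 | ⟨x, hx, hval⟩
    · rw [h0]
      exact (PySem.List.le_foldl_max _ _).1
    · rw [hval]
      have hxws : x ∈ ws := hperm.mem_iff.mp hx
      have hceq : ((sws.count x : Nat) : Int) = c x := by
        rw [hc]; simp [hperm.count_eq]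
      rw [hceq]
      have hmem : c x ∈ F.keys.map c := List.mem_map_of_mem ((hkeys x).mpr hxws)
      exact (PySem.List.le_foldl_max _ _).2 _ hmem

-- ===== VERDICT (by name: the statement is the Claim_ definition above) =====
theorem df_term_freq_spec : Claim_equal_df_term_freq := by
  intro text _
  unfold Spec_df_term_freq df_term_freq df_term_freq_alt
  set ws := (PySem.Str.split? (PySem.Str.lower text) " ").getD [] with hws
  set sws := PySem.List.sorted ws (fun w => w) false with hsws
  have hB : (sws.foldl
      (fun (s : Int × Int × Option String) w =>
        let run' := if some w == s.2.2 then s.2.1 + 1 else 1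
        let prev' := if some w == s.2.2 then s.2.2 else some w
        (if run' > s.1 then run' else s.1, run', prev'))
      ((0 : Int), (0 : Int), (none : Option String))).1 = pvN sws := by
    rw [pv_fold_eq_scan]
    rw [pv_scan_eq sws none 0 0
          (by simpa using PySem.List.sorted_pairwise ws (fun w => w))
          (fun x _ q hq => by cases hq) le_rfl le_rfl]
    have hfilt : sws.filter (fun x => !(some x == (none : Option String))) = sws := by
      apply List.filter_eq_self.mpr; intro a _; rfl
    rw [hfilt]
    have := pvN_nonneg sws
    simp only [pvCnt]
    omega
  rw [hB]
  exact pv_main ws
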